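-- pv_equiv track=rewrite | github.com/bitbanger/overcooked-demo | server/htnparser/chat_parser.py | fmt_args
-- ===== SOURCE A (Python) =====
-- def fmt_args(args):
-- 	args_fmt = ''
-- 	for gi in range(len(args)):
-- 		ga = args[gi]
-- 		if gi > 0:
-- 			if gi == len(args)-1:
-- 				args_fmt = args_fmt + ', and <code>%s</code>' % (ga)
-- 			else:
-- 				args_fmt = args_fmt + ', <code>%s</code>' % (ga)
-- 		else:
-- 			args_fmt = args_fmt + '<code>%s</code>' % (ga)
--
-- 	return args_fmt
-- ===== SOURCE B (Python) =====
-- def fmt_args(args):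
--     items = ['<code>%s</code>' % a for a in args]
--     if len(items) < 2:
--         return ''.join(items)
--     return ', '.join(items[:-1]) + ', and ' + items[-1]
-- ===== Notes on version B (the rewrite author's own statement) =====
-- stated objective: simpler
-- what changed: Replaces A's index loop with a per-position conditional separator (first / middle / last) by a two-phase format-then-join: a comprehension builds all '<code>…</code>' spans, then the result is assembled by joining all but the last with ', ' and appending ', and ' plus the last, with a join for fewer than two items.
import Mathlib
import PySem

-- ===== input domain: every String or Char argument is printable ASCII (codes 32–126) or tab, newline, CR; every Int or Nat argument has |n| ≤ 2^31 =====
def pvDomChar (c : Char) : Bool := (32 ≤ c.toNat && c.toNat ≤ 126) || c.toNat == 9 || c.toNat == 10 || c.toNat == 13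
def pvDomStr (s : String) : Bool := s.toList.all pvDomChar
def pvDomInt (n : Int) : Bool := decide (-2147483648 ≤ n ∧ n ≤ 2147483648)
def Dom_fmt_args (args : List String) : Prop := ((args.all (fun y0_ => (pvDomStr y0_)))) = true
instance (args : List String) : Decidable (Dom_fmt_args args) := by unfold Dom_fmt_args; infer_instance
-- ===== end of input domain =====

-- ===== PORT A =====
-- B formats all items in one comprehension and assembles by slicing off the last element
-- instead of A's per-index conditional-separator accumulation (objective: simpler decomposition).
def fmt_args (args : List String) : String :=
  (PySem.List.pyRange 0 (args.length : Int) 1).foldl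
    (fun args_fmt gi =>
      let ga := PySem.List.pyGetD args gi ""
      if gi > 0 then
        if gi = (args.length : Int) - 1 then
          args_fmt ++ ", and <code>" ++ ga ++ "</code>"
        else
          args_fmt ++ ", <code>" ++ ga ++ "</code>"
      else
        args_fmt ++ "<code>" ++ ga ++ "</code>")
    ""

-- ===== PORT B =====
def fmt_args_alt (args : List String) : String :=
  let items := args.map (fun a => "<code>" ++ a ++ "</code>")
  if items.length < 2 then
    PySem.Str.join "" items
  else
    PySem.Str.join ", " (PySem.List.slice items none (some (-1))) ++ ", and " ++
      PySem.List.pyGetD items (-1) ""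

-- ===== PRECONDITION & SPEC =====
def Spec_fmt_args (args : List String) (out : String) : Prop := out = fmt_args_alt args
instance (args : List String) (out : String) : Decidable (Spec_fmt_args args out) := by unfold Spec_fmt_args; infer_instance

-- ===== CLAIM (what is proved, stated in full; the proofs are below) =====
def Claim_equal_fmt_args : Prop := ∀ (args : List String), Dom_fmt_args args → Spec_fmt_args args (fmt_args args)

-- ===== LEMMAS AND PROOFS =====

-- the HTML span for one argument
def codeA (a : String) : String := "<code>" ++ a ++ "</code>"

-- A's per-index contribution, Nat-indexed
def gA (args : List String) (k : Nat) : String :=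
  if (k : Int) > 0 then
    if (k : Int) = (args.length : Int) - 1 then ", and <code>" ++ args.getD k "" ++ "</code>"
    else ", <code>" ++ args.getD k "" ++ "</code>"
  else "<code>" ++ args.getD k "" ++ "</code>"

def FA (args : List String) : String :=
  (List.range args.length).foldl (fun acc k => acc ++ gA args k) ""

-- the "no last element yet" contribution and fold
def gI (ys : List String) (k : Nat) : String :=
  if k = 0 then "<code>" ++ ys.getD 0 "" ++ "</code>"
  else ", <code>" ++ ys.getD k "" ++ "</code>"

def FI (ys : List String) : String :=
  (List.range ys.length).foldl (fun acc k => acc ++ gI ys k) ""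

lemma A_as_FA (args : List String) : fmt_args args = FA args := by
  unfold fmt_args FA
  rw [PySem.List.pyRange_one, List.foldl_map]
  refine PySem.List.foldl_congr_mem _ _ _ _ ?_
  intro acc k hk
  simp only [zero_add, PySem.List.pyGetD_natCast]
  unfold gA
  split_ifs <;> rw [← String.toList_inj] <;> simp [String.toList_append]

lemma join_concat (sep x : List Char) (L : List (List Char)) (h : L ≠ []) :
    PySem.Chars.join sep (L ++ [x]) = PySem.Chars.join sep L ++ sep ++ x := by
  induction L with
  | nil => exact absurd rfl h
  | cons a L ih =>
    cases L with
    | nil => simp [PySem.Chars.join_cons_cons, PySem.Chars.join_singleton]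
    | cons b L' =>
      have ih' := ih (by simp)
      simp only [List.cons_append] at ih' ⊢
      rw [PySem.Chars.join_cons_cons, PySem.Chars.join_cons_cons, ih']
      simp [List.append_assoc]

lemma FI_concat (ys : List String) (z : String) (h : ys ≠ []) :
    FI (ys ++ [z]) = FI ys ++ ", <code>" ++ z ++ "</code>" := by
  unfold FI
  have hm : (ys ++ [z]).length = ys.length + 1 := by simp
  rw [hm, List.range_succ, List.foldl_append]
  have h1 : (List.range ys.length).foldl (fun acc k => acc ++ gI (ys ++ [z]) k) "" =
      (List.range ys.length).foldl (fun acc k => acc ++ gI ys k) "" := by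
    refine PySem.List.foldl_congr_mem _ _ _ _ ?_
    intro acc k hk
    have hk' : k < ys.length := List.mem_range.mp hk
    unfold gI
    have h0 : 0 < ys.length := Nat.pos_of_ne_zero (by simpa using h)
    split_ifs with hz
    · rw [List.getD_append _ _ _ _ h0]
    · rw [List.getD_append _ _ _ _ hk']
  rw [h1]
  simp only [List.foldl_cons, List.foldl_nil]
  unfold gI
  have hne : ys.length ≠ 0 := by simpa using h
  rw [if_neg hne]
  have : (ys ++ [z]).getD ys.length "" = z := by
    simp [List.getD]
  rw [this, ← String.toList_inj]
  simp [String.toList_append]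

lemma FA_concat (ys : List String) (z : String) (h : ys ≠ []) :
    FA (ys ++ [z]) = FI ys ++ ", and <code>" ++ z ++ "</code>" := by
  unfold FA FI
  have hm : (ys ++ [z]).length = ys.length + 1 := by simp
  rw [hm, List.range_succ, List.foldl_append]
  have h1 : (List.range ys.length).foldl (fun acc k => acc ++ gA (ys ++ [z]) k) "" =
      (List.range ys.length).foldl (fun acc k => acc ++ gI ys k) "" := by
    refine PySem.List.foldl_congr_mem _ _ _ _ ?_
    intro acc k hk
    have hk' : k < ys.length := List.mem_range.mp hk
    unfold gA gI
    have hlast : ¬ ((k : Int) = ((ys ++ [z]).length : Int) - 1) := by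
      rw [hm]; push_cast; omega
    by_cases hz : k = 0
    · subst hz
      rw [if_neg (by omega), if_pos rfl, List.getD_append _ _ _ _ (by omega)]
    · rw [if_pos (by exact_mod_cast Nat.pos_of_ne_zero hz), if_neg hlast, if_neg hz,
        List.getD_append _ _ _ _ hk']
  rw [h1]
  simp only [List.foldl_cons, List.foldl_nil]
  unfold gA
  have hpos : ((ys.length : Int) > 0) := by
    have := Nat.pos_of_ne_zero (show ys.length ≠ 0 by simpa using h)
    exact_mod_cast this
  rw [if_pos hpos, if_pos (by rw [hm]; push_cast; ring)]
  have : (ys ++ [z]).getD ys.length "" = z := by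
    simp [List.getD]
  rw [this, ← String.toList_inj]
  simp [String.toList_append]

lemma FI_join (ys : List String) (h : ys ≠ []) :
    FI ys = PySem.Str.join ", " (ys.map codeA) := by
  induction ys using List.reverseRecOn with
  | nil => exact absurd rfl h
  | append_singleton ys z ih =>
    by_cases hys : ys = []
    · subst hys
      rw [← String.toList_inj]
      simp [FI, gI, codeA, PySem.Str.toList_join, PySem.Chars.join_singleton,
        String.toList_append, List.range_succ]
    · rw [FI_concat ys z hys, ih hys, ← String.toList_inj]
      have hmap : ys.map codeA ≠ [] := by simpa using hys
      simp only [List.map_append, List.map_cons, List.map_nil,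
        PySem.Str.toList_join, List.map_map]
      rw [join_concat _ _ _ (by simpa using hys)]
      simp [codeA, String.toList_append, PySem.Str.toList_join, List.map_map]

-- ===== VERDICT (by name: the statement is the Claim_ definition above) =====
theorem fmt_args_spec : Claim_equal_fmt_args := by
  intro args _
  unfold Spec_fmt_args
  rcases List.eq_nil_or_concat args with rfl | ⟨ys, z, rfl⟩
  · rfl
  · simp only [List.concat_eq_append]
    by_cases hys : ys = []
    · subst hys
      rw [A_as_FA, ← String.toList_inj]
      simp [FA, gA, fmt_args_alt, PySem.Str.toList_join, PySem.Chars.join_singleton,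
        String.toList_append, List.range_succ]
    · rw [A_as_FA, FA_concat ys z hys, FI_join ys hys, ← String.toList_inj]
      simp only [fmt_args_alt, List.map_append, List.map_cons, List.map_nil,
        PySem.List.slice_to_neg_one, List.dropLast_concat,
        PySem.List.pyGetD_neg_one_append_singleton]
      simp [hys, PySem.Str.toList_join, String.toList_append, List.map_map]
      rfl
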